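-- pv_equiv track=rewrite | github.com/Ewerton-Vieira/arcmg | utils.py | is_bistable
-- ===== SOURCE A (Python) =====
-- def is_bistable(class_set):
--     triple_conditions = [False, False, False]
--     for i in class_set:
--         if i == 0:
--             triple_conditions[0] = True
--         elif i % 2 == 0:
--             triple_conditions[1] = True
--         else:
--             triple_conditions[2] = True
--
--     return all(triple_conditions)
-- ===== SOURCE B (Python) =====
-- def is_bistable(class_set):
--     return (0 in class_set
--             and any(i != 0 and i % 2 == 0 for i in class_set)
--             and any(i % 2 != 0 for i in class_set))
-- ===== Notes on version B (the rewrite author's own statement) =====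
-- stated objective: idiomatic
-- what changed: Replaces A's single flag-accumulating loop over a mutable triple with a membership test plus two independent short-circuiting any() scans for the three conditions.
import Mathlib
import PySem

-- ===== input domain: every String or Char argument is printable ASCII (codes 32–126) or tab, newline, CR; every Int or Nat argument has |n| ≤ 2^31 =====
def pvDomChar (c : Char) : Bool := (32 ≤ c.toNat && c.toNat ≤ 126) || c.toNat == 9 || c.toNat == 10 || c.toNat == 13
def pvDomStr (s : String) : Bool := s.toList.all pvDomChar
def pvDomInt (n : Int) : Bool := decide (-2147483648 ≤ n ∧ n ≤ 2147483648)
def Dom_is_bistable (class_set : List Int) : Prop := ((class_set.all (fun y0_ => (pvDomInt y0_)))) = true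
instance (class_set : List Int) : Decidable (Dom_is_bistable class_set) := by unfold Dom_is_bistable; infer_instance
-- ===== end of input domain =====

-- ===== PORT A =====
-- One honest line: B checks the three conditions independently (membership + two any-scans) instead of A's flag loop; same O(n), idiomatic.
def is_bistable (class_set : List Int) : Bool :=
  let t := class_set.foldl
    (fun (t : Bool × Bool × Bool) i =>
      if i == 0 then (true, t.2.1, t.2.2)
      else if PySem.Int.mod i 2 == 0 then (t.1, true, t.2.2)
      else (t.1, t.2.1, true))
    (false, false, false)
  t.1 && t.2.1 && t.2.2

-- ===== PORT B =====
def is_bistable_alt (class_set : List Int) : Bool :=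
  class_set.contains 0
  && class_set.any (fun i => i != 0 && PySem.Int.mod i 2 == 0)
  && class_set.any (fun i => PySem.Int.mod i 2 != 0)

-- ===== PRECONDITION & SPEC =====
def Spec_is_bistable (class_set : List Int) (out : Bool) : Prop := out = is_bistable_alt class_set
instance (class_set : List Int) (out : Bool) : Decidable (Spec_is_bistable class_set out) := by unfold Spec_is_bistable; infer_instance

-- ===== CLAIM (what is proved, stated in full; the proofs are below) =====
def Claim_equal_is_bistable : Prop := ∀ (class_set : List Int), Dom_is_bistable class_set → Spec_is_bistable class_set (is_bistable class_set)

-- ===== LEMMAS AND PROOFS =====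

-- ===== VERDICT (by name: the statement is the Claim_ definition above) =====
theorem foldA_char (xs : List Int) (a b c : Bool) :
    (xs.foldl
      (fun (t : Bool × Bool × Bool) i =>
        if i == 0 then (true, t.2.1, t.2.2)
        else if PySem.Int.mod i 2 == 0 then (t.1, true, t.2.2)
        else (t.1, t.2.1, true))
      (a, b, c))
    = (a || xs.contains 0,
       b || xs.any (fun i => i != 0 && PySem.Int.mod i 2 == 0),
       c || xs.any (fun i => PySem.Int.mod i 2 != 0)) := by
  induction xs generalizing a b c with
  | nil => simp
  | cons x xs ih =>
    rw [List.foldl_cons, List.contains_cons, List.any_cons, List.any_cons]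
    by_cases h0 : (x == 0) = true
    · rw [if_pos h0, ih]
      have hx : x = 0 := by simpa using h0
      subst hx
      simp [PySem.Int.mod]
    · rw [if_neg h0]
      by_cases he : (PySem.Int.mod x 2 == 0) = true
      · rw [if_pos he, ih]
        have hne : x ≠ 0 := by simpa using h0
        have hx : (0 == x) = false := beq_eq_false_iff_ne.mpr (fun h => hne h.symm)
        have hx' : (x != 0) = true := by simpa using h0
        have he2 : x % 2 = 0 := by simpa [Int.fmod_eq_emod] using he
        simp [hx, hx', he2]
      · rw [if_neg he, ih]
        have hne : x ≠ 0 := by simpa using h0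
        have hx : (0 == x) = false := beq_eq_false_iff_ne.mpr (fun h => hne h.symm)
        have hx' : (x != 0) = true := by simpa using h0
        have he2 : x % 2 ≠ 0 := by simpa [Int.fmod_eq_emod] using he
        have he3 : x % 2 = 1 := by omega
        simp [hx, hx', he3]

theorem is_bistable_spec : Claim_equal_is_bistable := by
  intro xs _
  show is_bistable xs = is_bistable_alt xs
  unfold is_bistable is_bistable_alt
  rw [foldA_char]
  simp
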